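-- pv_equiv track=rewrite | github.com/shivendr7/cp | geeks/BitMagicMaxMinMovesToMakeXORLessThanX.py | count
-- ===== SOURCE A (Python) =====
-- def count(N, A, X):
--     # code here
--     prefix=0
--     ans=N
--     for i in range(30, -1, -1):
--         if ((X>>i)&1)!=0:
--             prefix^=(2**i)
--             continue
--         ct=0
--         p=prefix^(2**i)
--         for j in A:
--             if (j&p)==p:
--                 ct+=1
--         ans=min(ans, N-ct)
--     return ans
-- ===== SOURCE B (Python) =====
-- def count(N, A, X):
--     # Keep a shrinking candidate list S = elements that are supersets of the
--     # prefix of X's high bits fixed so far; the prefix itself never needs to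
--     # be materialized.
--     S = A
--     ans = N
--     m = 2 ** 30
--     for _ in range(31):
--         if X & m:
--             S = [j for j in S if j & m]
--         else:
--             ct = len([j for j in S if j & m])
--             ans = min(ans, N - ct)
--         m //= 2
--     return ans
-- ===== Notes on version B (the rewrite author's own statement) =====
-- stated objective: alternative
-- what changed: Instead of rescanning all of A with a prefix mask on every bit, B keeps a shrinking candidate list of elements that are supersets of the bits fixed so far, filtering it on X's 1-bits and counting bit-i members on X's 0-bits; the prefix accumulator disappears and the per-bit work shrinks with the candidate set.
import Mathlib
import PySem

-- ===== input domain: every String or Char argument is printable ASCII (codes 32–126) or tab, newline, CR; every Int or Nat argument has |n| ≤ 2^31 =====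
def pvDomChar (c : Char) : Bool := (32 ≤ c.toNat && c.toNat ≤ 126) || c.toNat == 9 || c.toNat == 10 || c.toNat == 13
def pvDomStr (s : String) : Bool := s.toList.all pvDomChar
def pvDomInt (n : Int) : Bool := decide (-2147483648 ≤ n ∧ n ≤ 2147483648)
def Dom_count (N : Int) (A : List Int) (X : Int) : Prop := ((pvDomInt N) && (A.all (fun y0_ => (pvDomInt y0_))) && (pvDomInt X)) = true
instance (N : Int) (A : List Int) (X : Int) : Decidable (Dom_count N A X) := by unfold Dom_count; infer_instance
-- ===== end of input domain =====

-- B replaces A's per-bit full scans of A with one shrinking candidate list that is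
-- pruned on X's 1-bits, so A's prefix accumulator disappears (objective: alternative).

-- ===== PORT A =====
-- the inner 'ct=0; for j in A: if (j&p)==p: ct+=1' loop of A
def ctA (A : List Int) (p : Int) : Int :=
  A.foldl (fun ct j => if PySem.Int.band j p = p then ct + 1 else ct) 0

-- one iteration of A's 'for i in range(30,-1,-1)' loop, state = (prefix, ans);
-- every i in range(30,-1,-1) is nonnegative, so 'X>>i' and '2**i' are exactly
-- 'X >>> i.toNat' and '2 ^ i.toNat'
def stepA (N X : Int) (A : List Int) (st : Int × Int) (i : Int) : Int × Int :=
  if PySem.Int.band (X >>> i.toNat) 1 ≠ 0 then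
    (PySem.Int.bxor st.1 (2 ^ i.toNat), st.2)
  else
    (st.1, min st.2 (N - ctA A (PySem.Int.bxor st.1 (2 ^ i.toNat))))

def count (N : Int) (A : List Int) (X : Int) : Int :=
  ((PySem.List.pyRange 30 (-1) (-1)).foldl (stepA N X A) (0, N)).2

-- ===== PORT B =====
-- one iteration of B's 'for _ in range(31)' loop, state = (S, ans, m)
def stepB (N X : Int) (st : List Int × Int × Int) (_i : Int) : List Int × Int × Int :=
  if PySem.Int.band X st.2.2 ≠ 0 then
    (st.1.filter (fun j => PySem.Int.band j st.2.2 != 0), st.2.1, PySem.Int.floordiv st.2.2 2)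
  else
    (st.1, min st.2.1 (N - ((st.1.filter (fun j => PySem.Int.band j st.2.2 != 0)).length : Int)),
     PySem.Int.floordiv st.2.2 2)

def count_alt (N : Int) (A : List Int) (X : Int) : Int :=
  ((PySem.List.pyRange 0 31 1).foldl (stepB N X) (A, N, 2 ^ 30)).2.1

-- ===== PRECONDITION & SPEC =====
def Spec_count (N : Int) (A : List Int) (X : Int) (out : Int) : Prop := out = count_alt N A X
instance (N : Int) (A : List Int) (X : Int) (out : Int) : Decidable (Spec_count N A X out) := by unfold Spec_count; infer_instance

-- ===== CLAIM (what is proved, stated in full; the proofs are below) =====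
def Claim_equal_count : Prop := ∀ (N : Int) (A : List Int) (X : Int), Dom_count N A X → Spec_count N A X (count N A X)

-- ===== LEMMAS AND PROOFS =====

-- bit k of the infinite two's-complement representation of a (Python's (a >> k) & 1)
def Bt (a : Int) (k : Nat) : Bool :=
  if 0 ≤ a then a.toNat.testBit k else !((-a - 1).toNat.testBit k)

theorem testBit_big (x y : Nat) : x.testBit (x + y) = false :=
  Nat.testBit_lt_two_pow (by
    calc x < 2 ^ x := Nat.lt_two_pow_self
      _ ≤ 2 ^ (x + y) := Nat.pow_le_pow_right (by norm_num) (by omega))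

theorem mixed_absurd (x y : Nat) (h : ∀ k, x.testBit k = !(y.testBit k)) : False := by
  have hx := testBit_big x y
  have hy : y.testBit (x + y) = false := by have := testBit_big y x; rwa [Nat.add_comm] at this
  have := h (x + y)
  rw [hx, hy] at this
  simp at this

theorem bt_ext {a b : Int} (h : ∀ k, Bt a k = Bt b k) : a = b := by
  by_cases ha : 0 ≤ a <;> by_cases hb : 0 ≤ b
  · have : a.toNat = b.toNat := Nat.eq_of_testBit_eq (fun k => by
      have := h k; simpa [Bt, ha, hb] using this)
    omega
  · exact (mixed_absurd a.toNat (-b - 1).toNat (fun k => by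
      have := h k; simpa [Bt, ha, hb] using this)).elim
  · exact (mixed_absurd b.toNat (-a - 1).toNat (fun k => by
      have := (h k).symm; simpa [Bt, ha, hb] using this)).elim
  · have : (-a - 1).toNat = (-b - 1).toNat := Nat.eq_of_testBit_eq (fun k => by
      have := h k; simp [Bt, ha, hb] at this; simpa using this)
    omega

theorem sub_land_eq_ldiff (m n : Nat) : m - (m &&& n) = Nat.ldiff m n := by
  have h : (m &&& n) + Nat.ldiff m n = m := by
    induction m using Nat.binaryRec generalizing n with
    | zero => simp [Nat.ldiff]
    | bit b m ih =>
      rw [← Nat.bit_testBit_zero_shiftRight_one n, Nat.land_bit, Nat.ldiff_bit,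
        Nat.bit_val, Nat.bit_val, Nat.bit_val]
      have := ih (n := n >>> 1)
      cases b <;> cases n.testBit 0 <;> simp at * <;> omega
  omega

theorem bt_band (a b : Int) (k : Nat) : Bt (PySem.Int.band a b) k = (Bt a k && Bt b k) := by
  by_cases ha : 0 ≤ a <;> by_cases hb : 0 ≤ b <;>
    simp only [PySem.Int.band, ha, hb, if_true, if_false, Bt]
  · simp [Nat.testBit_and]
  · have h1 : (0:Int) ≤ ((a.toNat - (a.toNat &&& (-b - 1).toNat) : Nat) : Int) := Int.natCast_nonneg _
    simp only [h1, if_true, Int.toNat_natCast]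
    rw [sub_land_eq_ldiff, Nat.testBit_ldiff]
  · have h1 : (0:Int) ≤ ((b.toNat - (b.toNat &&& (-a - 1).toNat) : Nat) : Int) := Int.natCast_nonneg _
    simp only [h1, if_true, Int.toNat_natCast]
    rw [sub_land_eq_ldiff, Nat.testBit_ldiff, Bool.and_comm]
  · have h1 : ¬ (0:Int) ≤ -(((-a - 1).toNat ||| (-b - 1).toNat : Nat) : Int) - 1 := by omega
    simp only [h1, if_false]
    have h2 : (-(-(((-a - 1).toNat ||| (-b - 1).toNat : Nat) : Int) - 1) - 1).toNat
        = (-a - 1).toNat ||| (-b - 1).toNat := by omega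
    rw [h2, Nat.testBit_or]
    cases (-a - 1).toNat.testBit k <;> cases (-b - 1).toNat.testBit k <;> simp

theorem bt_bxor (a b : Int) (k : Nat) : Bt (PySem.Int.bxor a b) k = xor (Bt a k) (Bt b k) := by
  by_cases ha : 0 ≤ a <;> by_cases hb : 0 ≤ b <;>
    simp only [PySem.Int.bxor, ha, hb, if_true, if_false, Bt]
  · simp [Nat.testBit_xor]
  · have h1 : ¬ (0:Int) ≤ -((a.toNat ^^^ (-b - 1).toNat : Nat) : Int) - 1 := by omega
    have h2 : (-(-((a.toNat ^^^ (-b - 1).toNat : Nat) : Int) - 1) - 1).toNat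
        = a.toNat ^^^ (-b - 1).toNat := by omega
    simp only [h1, if_false, h2]
    rw [Nat.testBit_xor]
    cases a.toNat.testBit k <;> cases (-b - 1).toNat.testBit k <;> simp
  · have h1 : ¬ (0:Int) ≤ -(((-a - 1).toNat ^^^ b.toNat : Nat) : Int) - 1 := by omega
    have h2 : (-(-(((-a - 1).toNat ^^^ b.toNat : Nat) : Int) - 1) - 1).toNat
        = (-a - 1).toNat ^^^ b.toNat := by omega
    simp only [h1, if_false, h2]
    rw [Nat.testBit_xor]
    cases (-a - 1).toNat.testBit k <;> cases b.toNat.testBit k <;> simp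
  · have h1 : (0:Int) ≤ (((-a - 1).toNat ^^^ (-b - 1).toNat : Nat) : Int) := Int.natCast_nonneg _
    simp only [h1, if_true, Int.toNat_natCast]
    rw [Nat.testBit_xor]
    cases (-a - 1).toNat.testBit k <;> cases (-b - 1).toNat.testBit k <;> simp

theorem bt_two_pow (n k : Nat) : Bt ((2 : Int) ^ n) k = decide (n = k) := by
  have h0 : (0:Int) ≤ 2 ^ n := by positivity
  have h1 : ((2:Int) ^ n).toNat = 2 ^ n := by
    have h : ((2:Int) ^ n) = (((2 ^ n : Nat) : Int)) := by push_cast; ring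
    rw [h, Int.toNat_natCast]
  simp [Bt, h0, h1, Nat.testBit_two_pow]

theorem bt_zero (k : Nat) : Bt (0 : Int) k = false := by simp [Bt]

theorem negSucc_helper (t : Nat) : ¬ (0:Int) ≤ Int.negSucc t ∧ (-(Int.negSucc t) - 1).toNat = t := by
  rw [Int.negSucc_eq]
  exact ⟨by omega, by omega⟩

theorem bt_shiftRight (x : Int) (n j : Nat) : Bt (x >>> n) j = Bt x (n + j) := by
  cases x with
  | ofNat m =>
    rw [show (Int.ofNat m) = ((m : Nat) : Int) from rfl]
    simp [Bt, ← Int.natCast_shiftRight, Nat.testBit_shiftRight]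
  | negSucc m =>
    rw [show (Int.negSucc m) >>> n = Int.negSucc (m >>> n) from rfl]
    simp only [Bt, (negSucc_helper (m >>> n)).1, (negSucc_helper m).1, if_false,
      (negSucc_helper (m >>> n)).2, (negSucc_helper m).2, Nat.testBit_shiftRight]

theorem band_eq_zero (a : Int) (h : ∀ k, Bt a k = false) : a = 0 :=
  bt_ext (fun k => by rw [h, bt_zero])

theorem bt_bit0 (y : Int) : (Bt y 0 = true) ↔ y % 2 = 1 := by
  unfold Bt
  split_ifs with h
  · rw [Nat.testBit_zero]; simp; omega
  · rw [Nat.testBit_zero]; simp; omega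

-- A's loop test '((X>>i)&1)!=0' reads bit i
theorem condA (x : Int) (n : Nat) : (PySem.Int.band (x >>> n) 1 ≠ 0) ↔ Bt x n = true := by
  rw [PySem.Int.band_one]
  have hbt : Bt x n = Bt (x >>> n) 0 := by rw [bt_shiftRight]; norm_num
  rw [hbt, bt_bit0]
  unfold PySem.Int.mod
  rw [Int.fmod_eq_emod]
  simp only [zero_le_two, true_or, if_true]
  omega

-- B's loop test 'X & m' (m = 2^n) reads bit n
theorem condB (x : Int) (n : Nat) : (PySem.Int.band x ((2 : Int) ^ n) ≠ 0) ↔ Bt x n = true := by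
  constructor
  · intro h
    by_contra hc
    simp at hc
    exact h (band_eq_zero _ (fun k => by
      rw [bt_band, bt_two_pow]
      rcases eq_or_ne n k with rfl | hne
      · simp [hc]
      · simp [hne]))
  · intro h hc
    have := bt_band x ((2:Int) ^ n) n
    rw [hc, bt_zero, bt_two_pow, h] at this
    simp at this

-- 'j & q == q' says: every bit set in q is set in j
theorem band_eq_right_iff (j q : Int) :
    PySem.Int.band j q = q ↔ ∀ k, Bt q k = true → Bt j k = true := by
  constructor
  · intro h k hq
    have := bt_band j q k
    rw [h, hq] at this
    simpa using this.symm
  · intro h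
    apply bt_ext
    intro k
    rw [bt_band]
    cases hq : Bt q k
    · simp
    · simp [h k hq]

-- the key pointwise fact: superset of prefix^2^n = superset of prefix AND bit n set
theorem key_iff (P j : Int) (n : Nat) (hPn : Bt P n = false) :
    PySem.Int.band j (PySem.Int.bxor P (2 ^ n)) = PySem.Int.bxor P (2 ^ n) ↔
      (PySem.Int.band j P = P ∧ Bt j n = true) := by
  have hp : ∀ k, Bt (PySem.Int.bxor P (2 ^ n)) k = (Bt P k || decide (n = k)) := by
    intro k
    rw [bt_bxor, bt_two_pow]
    rcases eq_or_ne n k with rfl | hne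
    · simp [hPn]
    · simp [hne]
  rw [band_eq_right_iff, band_eq_right_iff]
  constructor
  · intro h
    refine ⟨fun k hk => h k (by rw [hp]; simp [hk]), h n (by rw [hp]; simp)⟩
  · rintro ⟨h1, h2⟩ k hk
    rw [hp] at hk
    rcases Bool.or_eq_true_iff.mp hk with hk | hk
    · exact h1 k hk
    · simp at hk
      subst hk
      exact h2

def bitsA (n : Nat) : List Int := (List.range n).reverse.map (fun k => (k : Int))

theorem bitsA_succ (n : Nat) : bitsA (n + 1) = (n : Int) :: bitsA n := by
  simp [bitsA, List.range_succ]

theorem foldl_count (A : List Int) (p : Int) : ∀ c : Int,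
    A.foldl (fun ct j => if PySem.Int.band j p = p then ct + 1 else ct) c
      = c + (A.countP (fun j => PySem.Int.band j p == p) : Int) := by
  induction A with
  | nil => intro c; simp
  | cons a A ih =>
    intro c
    simp only [List.foldl_cons, List.countP_cons, ih]
    by_cases h : PySem.Int.band a p = p
    · simp [h]; ring
    · simp [h]

theorem ctA_eq (A : List Int) (p : Int) :
    ctA A p = (A.countP (fun j => PySem.Int.band j p == p) : Int) := by
  rw [ctA, foldl_count]; ring

theorem main_loop (N X : Int) (A : List Int) (n : Nat) (lB : List Int) (P ans m : Int)
    (S : List Int) (hlen : lB.length = n) (hm : 1 ≤ n → m = 2 ^ (n - 1))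
    (hP : ∀ k, k < n → Bt P k = false)
    (hS : S = A.filter (fun j => PySem.Int.band j P == P)) :
    ((bitsA n).foldl (stepA N X A) (P, ans)).2 = (lB.foldl (stepB N X) (S, ans, m)).2.1 := by
  induction n generalizing lB P ans m S with
  | zero =>
    rw [List.length_eq_zero_iff] at hlen
    subst hlen
    simp [bitsA]
  | succ n ih =>
    rcases lB with _ | ⟨b, lB'⟩
    · simp at hlen
    have hlen' : lB'.length = n := by simpa using hlen
    have hmcur : m = 2 ^ n := by simpa using hm (by omega)
    subst hmcur
    rw [bitsA_succ, List.foldl_cons, List.foldl_cons]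
    have htnat : ((n : Int)).toNat = n := Int.toNat_natCast n
    by_cases hbit : Bt X n = true
    · -- bit n of X is set: A updates prefix, B filters
      have hA : stepA N X A (P, ans) (n : Int) = (PySem.Int.bxor P (2 ^ n), ans) := by
        rw [stepA, htnat, if_pos ((condA X n).mpr hbit)]
      have hB : stepB N X (S, ans, 2 ^ n) b
          = (S.filter (fun j => PySem.Int.band j (2 ^ n) != 0), ans,
             PySem.Int.floordiv (2 ^ n) 2) := by
        rw [stepB, if_pos]
        exact (condB X n).mpr hbit
      rw [hA, hB]
      apply ih
      · exact hlen'
      · intro hn1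
        show PySem.Int.floordiv (2 ^ n) 2 = 2 ^ (n - 1)
        rw [PySem.Int.floordiv]
        rcases Nat.exists_eq_add_of_le hn1 with ⟨t, rfl⟩
        ring_nf
        have ht : (1:Nat) + t - 1 = t := by omega
        rw [ht, Int.mul_fdiv_cancel _ (by norm_num)]
      · intro k hk
        rw [bt_bxor, bt_two_pow, hP k (by omega)]
        simp
        omega
      · rw [hS, List.filter_filter]
        apply List.filter_congr
        intro j _
        rw [Bool.eq_iff_iff]
        simp only [Bool.and_eq_true, beq_iff_eq, bne_iff_ne, ne_eq]
        have hkey := key_iff P j n (hP n (by omega))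
        have hcb := condB j n
        tauto
    · -- bit n of X is clear: both take a count
      have hA : stepA N X A (P, ans) (n : Int)
          = (P, min ans (N - ctA A (PySem.Int.bxor P (2 ^ n)))) := by
        rw [stepA, htnat, if_neg (by simpa [condA X n] using hbit)]
      have hB : stepB N X (S, ans, 2 ^ n) b
          = (S, min ans (N - ((S.filter (fun j => PySem.Int.band j (2 ^ n) != 0)).length : Int)),
             PySem.Int.floordiv (2 ^ n) 2) := by
        rw [stepB, if_neg (by simpa [condB X n] using hbit)]
      rw [hA, hB]
      have hct : ctA A (PySem.Int.bxor P (2 ^ n))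
          = ((S.filter (fun j => PySem.Int.band j (2 ^ n) != 0)).length : Int) := by
        rw [ctA_eq, hS, ← List.countP_eq_length_filter, List.countP_filter]
        congr 1
        apply List.countP_congr
        intro j _
        rw [Bool.eq_iff_iff]
        simp only [Bool.and_eq_true, beq_iff_eq, bne_iff_ne, ne_eq]
        have hkey := key_iff P j n (hP n (by omega))
        have hcb := condB j n
        tauto
      rw [hct]
      apply ih
      · exact hlen'
      · intro hn1
        show PySem.Int.floordiv (2 ^ n) 2 = 2 ^ (n - 1)
        rw [PySem.Int.floordiv]
        rcases Nat.exists_eq_add_of_le hn1 with ⟨t, rfl⟩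
        ring_nf
        have ht : (1:Nat) + t - 1 = t := by omega
        rw [ht, Int.mul_fdiv_cancel _ (by norm_num)]
      · intro k hk
        exact hP k (by omega)
      · exact hS

-- ===== VERDICT (by name: the statement is the Claim_ definition above) =====
theorem count_spec : Claim_equal_count := by
  intro N A X _
  unfold Spec_count count count_alt
  have h1 : PySem.List.pyRange 30 (-1) (-1) = bitsA 31 := by decide
  have h2 : (PySem.List.pyRange 0 31 1).length = 31 := by decide
  rw [h1]
  exact main_loop N X A 31 _ 0 N (2 ^ 30) A h2 (by intro _; norm_num) (fun k _ => bt_zero k)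
    (by simp [PySem.Int.band_zero])
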